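-- pv_equiv track=rewrite | github.com/rafael-npalhares/Aprender_crescer | models/professor.py | organizar_horarios_por_dia
-- ===== SOURCE A (Python) =====
-- def organizar_horarios_por_dia(horarios):
--     horarios_organizados = {
--         'segunda': [],
--         'terca': [],
--         'quarta': [],
--         'quinta': [],
--         'sexta': [],
--         'sabado': []
--     }
--
--     for horario in horarios:
--         dia = horario['dia_semana']
--         if dia in horarios_organizados:
--             horarios_organizados[dia].append(horario)
--
--     return horarios_organizados
-- ===== SOURCE B (Python) =====
-- def organizar_horarios_por_dia(horarios):
--     dias = ['segunda', 'terca', 'quarta', 'quinta', 'sexta', 'sabado']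
--     return {dia: [h for h in horarios if h['dia_semana'] == dia] for dia in dias}
-- ===== Notes on version B (the rewrite author's own statement) =====
-- stated objective: idiomatic
-- what changed: Replaces the single mutating grouping pass over a pre-built dict with a dict comprehension over the fixed six weekday keys, each value an independent filtering scan of the input.
import Mathlib
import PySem

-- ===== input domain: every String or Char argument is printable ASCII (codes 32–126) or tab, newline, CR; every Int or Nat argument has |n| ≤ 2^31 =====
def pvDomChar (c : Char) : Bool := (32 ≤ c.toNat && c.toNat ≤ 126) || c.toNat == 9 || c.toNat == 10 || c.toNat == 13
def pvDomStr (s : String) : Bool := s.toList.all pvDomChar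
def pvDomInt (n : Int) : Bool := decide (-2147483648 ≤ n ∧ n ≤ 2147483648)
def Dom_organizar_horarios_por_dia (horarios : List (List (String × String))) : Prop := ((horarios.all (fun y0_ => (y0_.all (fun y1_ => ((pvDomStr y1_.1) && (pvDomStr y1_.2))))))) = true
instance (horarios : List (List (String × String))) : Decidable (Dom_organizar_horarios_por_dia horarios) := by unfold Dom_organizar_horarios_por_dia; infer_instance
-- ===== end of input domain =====

-- B groups by one filtering scan per fixed weekday key instead of A's single mutating pass over a pre-built dict; same return value.

-- horario['dia_semana'] — first-match lookup in the dict (assoc list); "" only reached outside Pre_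
def pvDiaSemana (horario : List (String × String)) : String :=
  (PySem.Dict.mk horario).getD "dia_semana" ""

-- ===== PORT A =====
def organizar_horarios_por_dia (horarios : List (List (String × String))) : List (String × List (List (String × String))) :=
  let init : PySem.Dict String (List (List (String × String))) :=
    PySem.Dict.ofList [("segunda", []), ("terca", []), ("quarta", []), ("quinta", []), ("sexta", []), ("sabado", [])]
  let final := horarios.foldl (fun d horario =>
      let dia := pvDiaSemana horario
      if d.contains dia then d.modify dia [] (fun l => l ++ [horario]) else d) init
  final.items

-- ===== PORT B =====
def organizar_horarios_por_dia_alt (horarios : List (List (String × String))) : List (String × List (List (String × String))) :=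
  ["segunda", "terca", "quarta", "quinta", "sexta", "sabado"].map
    (fun dia => (dia, horarios.filter (fun h => pvDiaSemana h == dia)))

-- ===== PRECONDITION & SPEC =====
-- Pre_ excludes exactly the inputs where some horario lacks the key 'dia_semana': there both Pythons raise KeyError.
def Pre_organizar_horarios_por_dia (horarios : List (List (String × String))) : Prop :=
  ∀ h ∈ horarios, (PySem.Dict.mk h).contains "dia_semana" = true
instance (horarios : List (List (String × String))) : Decidable (Pre_organizar_horarios_por_dia horarios) := by unfold Pre_organizar_horarios_por_dia; infer_instance

def pvWitness_organizar_horarios_por_dia : (List (List (String × String))) :=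
  [[("dia_semana", "segunda"), ("hora", "08:00")], [("dia_semana", "domingo")]]

def Spec_organizar_horarios_por_dia (horarios : List (List (String × String))) (out : List (String × List (List (String × String)))) : Prop := out = organizar_horarios_por_dia_alt horarios
instance (horarios : List (List (String × String))) (out : List (String × List (List (String × String)))) : Decidable (Spec_organizar_horarios_por_dia horarios out) := by unfold Spec_organizar_horarios_por_dia; infer_instance

-- ===== CLAIM (what is proved, stated in full; the proofs are below) =====
def Claim_equal_organizar_horarios_por_dia : Prop := ∀ (horarios : List (List (String × String))), Dom_organizar_horarios_por_dia horarios → Pre_organizar_horarios_por_dia horarios → Spec_organizar_horarios_por_dia horarios (organizar_horarios_por_dia horarios)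

-- ===== LEMMAS AND PROOFS =====

-- A's loop body, abbreviated for the lemmas
def pvStep (d : PySem.Dict String (List (List (String × String)))) (horario : List (String × String)) :
    PySem.Dict String (List (List (String × String))) :=
  let dia := pvDiaSemana horario
  if d.contains dia then d.modify dia [] (fun l => l ++ [horario]) else d

lemma pvStep_keys (d : PySem.Dict String (List (List (String × String)))) (h : List (String × String)) :
    (pvStep d h).keys = d.keys := by
  show (if d.contains (pvDiaSemana h) = true then d.modify (pvDiaSemana h) [] (fun l => l ++ [h]) else d).keys = d.keys
  split
  · rename_i hc
    simp [PySem.Dict.keys_modify, PySem.Dict.keys_insert_of_contains, hc]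
  · rfl

lemma pvFold_keys (hs : List (List (String × String))) (d : PySem.Dict String (List (List (String × String)))) :
    (hs.foldl pvStep d).keys = d.keys := by
  induction hs generalizing d with
  | nil => rfl
  | cons h t ih => rw [List.foldl_cons, ih, pvStep_keys]

lemma pvStep_contains (d : PySem.Dict String (List (List (String × String)))) (h : List (String × String))
    (c : String) : (pvStep d h).contains c = d.contains c := by
  have : (pvStep d h).keys = d.keys := pvStep_keys d h
  simp [PySem.Dict.contains_eq_decide_mem_keys, this]

lemma pvFold_getD (hs : List (List (String × String))) (d : PySem.Dict String (List (List (String × String))))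
    (c : String) (hc : d.contains c = true) :
    (hs.foldl pvStep d).getD c [] = d.getD c [] ++ hs.filter (fun h => pvDiaSemana h == c) := by
  induction hs generalizing d with
  | nil => simp
  | cons h t ih =>
    rw [List.foldl_cons, ih _ (by rw [pvStep_contains]; exact hc)]
    by_cases hd : pvDiaSemana h = c
    · have : (pvStep d h).getD c [] = d.getD c [] ++ [h] := by
        show (if d.contains (pvDiaSemana h) = true then d.modify (pvDiaSemana h) [] (fun l => l ++ [h]) else d).getD c [] = _
        rw [hd, if_pos hc]
        exact PySem.Dict.getD_modify_self d c [] _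
      rw [this, List.filter_cons]
      simp [hd]
    · have : (pvStep d h).getD c [] = d.getD c [] := by
        show (if d.contains (pvDiaSemana h) = true then d.modify (pvDiaSemana h) [] (fun l => l ++ [h]) else d).getD c [] = _
        split
        · exact PySem.Dict.getD_modify_of_ne _ _ _ (Ne.symm hd)
        · rfl
      rw [this, List.filter_cons]
      simp [hd]

-- ===== VERDICT (by name: the statement is the Claim_ definition above) =====
theorem organizar_horarios_por_dia_spec : Claim_equal_organizar_horarios_por_dia := by
  intro horarios _ _
  unfold Spec_organizar_horarios_por_dia organizar_horarios_por_dia organizar_horarios_por_dia_alt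
  simp only []
  set init : PySem.Dict String (List (List (String × String))) :=
    PySem.Dict.ofList [("segunda", []), ("terca", []), ("quarta", []), ("quinta", []), ("sexta", []), ("sabado", [])] with hinit
  have hfold : horarios.foldl (fun d horario =>
      let dia := pvDiaSemana horario
      if d.contains dia then d.modify dia [] (fun l => l ++ [horario]) else d) init
      = horarios.foldl pvStep init := rfl
  rw [hfold]
  have hkeys : (horarios.foldl pvStep init).keys = ["segunda", "terca", "quarta", "quinta", "sexta", "sabado"] := by
    rw [pvFold_keys]; decide
  have hnd : (horarios.foldl pvStep init).keys.Nodup := by rw [hkeys]; decide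
  rw [PySem.Dict.items_eq_map_keys _ hnd [], hkeys]
  have hg : ∀ c : String, init.contains c = true → init.getD c [] = [] →
      (List.foldl pvStep init horarios).getD c [] = List.filter (fun h => pvDiaSemana h == c) horarios := by
    intro c h1 h2
    rw [pvFold_getD _ _ _ h1, h2, List.nil_append]
  simp only [List.map_cons, List.map_nil]
  rw [hg "segunda" (by decide) (by decide), hg "terca" (by decide) (by decide),
      hg "quarta" (by decide) (by decide), hg "quinta" (by decide) (by decide),
      hg "sexta" (by decide) (by decide), hg "sabado" (by decide) (by decide)]
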